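-- pv_equiv track=rewrite | github.com/semicontinuity/datatools | insight/logic/singletons.py | global_singletons
-- ===== SOURCE A (Python) =====
-- from typing import Hashable, Sequence, Set
--
-- def global_singletons(tokenized_strings: Sequence[Sequence[Hashable]]) -> Set:
--     singletons = None
--     local_singletons = set()
--     local_non_singletons = set()
--
--     for tokens in tokenized_strings:
--         for token in tokens:
--             if token in local_singletons:
--                 local_singletons.remove(token)
--                 local_non_singletons.add(token)
--             elif token not in local_non_singletons:
--                 local_singletons.add(token)
--
--         if singletons is None:
--             singletons = set(local_singletons)
--         else:
--             singletons &= local_singletons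
--
--         local_singletons.clear()
--         local_non_singletons.clear()
--
--     return singletons
-- ===== SOURCE B (Python) =====
-- def global_singletons(tokenized_strings):
--     if not tokenized_strings:
--         return None
--     n = len(tokenized_strings)
--     total = {}     # token -> total number of occurrences over all strings
--     present = {}   # token -> number of strings containing it
--     for tokens in tokenized_strings:
--         for t in tokens:
--             total[t] = total.get(t, 0) + 1
--         for t in set(tokens):
--             present[t] = present.get(t, 0) + 1
--     # t has count exactly 1 in every string  <=>  t occurs in all n strings
--     # and its total count is n (each of the n containing strings then has 1).
--     return {t for t, c in present.items() if c == n and total.get(t, 0) == n}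
-- ===== Notes on version B (the rewrite author's own statement) =====
-- stated objective: alternative
-- what changed: B drops A's per-string singleton sets and running intersection entirely: it makes one global pass keeping two tallies (total occurrences per token, number of strings containing the token) and at the end selects tokens whose both tallies equal the number of strings, which is equivalent to having count exactly 1 in every string.
import Mathlib
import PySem

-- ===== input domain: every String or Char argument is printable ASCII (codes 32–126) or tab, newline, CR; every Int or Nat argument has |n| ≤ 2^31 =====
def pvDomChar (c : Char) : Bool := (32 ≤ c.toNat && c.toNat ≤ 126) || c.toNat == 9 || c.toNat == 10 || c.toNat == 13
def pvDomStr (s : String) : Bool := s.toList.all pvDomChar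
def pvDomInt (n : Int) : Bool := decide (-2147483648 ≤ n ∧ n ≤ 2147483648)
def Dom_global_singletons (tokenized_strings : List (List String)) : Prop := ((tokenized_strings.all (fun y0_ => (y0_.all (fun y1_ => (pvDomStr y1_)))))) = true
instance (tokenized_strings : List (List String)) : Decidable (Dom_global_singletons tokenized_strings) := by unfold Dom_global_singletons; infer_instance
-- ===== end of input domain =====

-- B replaces A's per-string singleton sets + running intersection with one global pass keeping two
-- tallies (total occurrences; number of containing strings) and a final arithmetic filter (alternative;
-- same asymptotic cost). Equivalence of the returned value is proved; neither program observably mutates its argument.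

-- ===== PORT A =====
-- inner loop body of A: move token between local_singletons / local_non_singletons
-- (A's `remove` is guarded by the membership test, so it never raises; discard is exact here)
def pvInnerA (st : PySem.Set String × PySem.Set String) (token : String) :
    PySem.Set String × PySem.Set String :=
  if PySem.Set.contains st.1 token then
    (PySem.Set.discard st.1 token, PySem.Set.add st.2 token)
  else if PySem.Set.contains st.2 token then st
  else (PySem.Set.add st.1 token, st.2)

-- one outer iteration of A: inner loop, update `singletons`, clear both local sets
def pvStepA (st : Option (PySem.Set String) × PySem.Set String × PySem.Set String)
    (tokens : List String) :
    Option (PySem.Set String) × PySem.Set String × PySem.Set String :=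
  let p := tokens.foldl pvInnerA (st.2.1, st.2.2)
  let s : Option (PySem.Set String) :=
    match st.1 with
    | none => some (PySem.Set.ofList p.1)        -- singletons = set(local_singletons)
    | some s => some (PySem.Set.inter s p.1)     -- singletons &= local_singletons
  (s, PySem.Set.empty, PySem.Set.empty)          -- .clear() of both local sets

def global_singletons (tokenized_strings : List (List String)) : Option (List String) :=
  (tokenized_strings.foldl pvStepA (none, PySem.Set.empty, PySem.Set.empty)).1

-- ===== PORT B =====
-- one global pass: total[t] = total.get(t,0)+1 per occurrence; present[t] = present.get(t,0)+1 per string containing t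
def global_singletons_alt (tokenized_strings : List (List String)) : Option (List String) :=
  if tokenized_strings = [] then none
  else
    let n : Int := tokenized_strings.length
    let st := tokenized_strings.foldl
      (fun (st : PySem.Dict String Int × PySem.Dict String Int) tokens =>
        (tokens.foldl (fun d t => d.insert t (d.getD t 0 + 1)) st.1,
         (PySem.Set.ofList tokens).foldl (fun d t => d.insert t (d.getD t 0 + 1)) st.2))
      (PySem.Dict.empty, PySem.Dict.empty)
    -- {t for t, c in present.items() if c == n and total.get(t, 0) == n}
    some (PySem.Set.ofList
      ((st.2.items.filter (fun p => p.2 == n && st.1.getD p.1 0 == n)).map Prod.fst))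

-- ===== PRECONDITION & SPEC =====
def Spec_global_singletons (tokenized_strings : List (List String)) (out : Option (List String)) : Prop := out = global_singletons_alt tokenized_strings
instance (tokenized_strings : List (List String)) (out : Option (List String)) : Decidable (Spec_global_singletons tokenized_strings out) := by unfold Spec_global_singletons; infer_instance

-- ===== CLAIM (what is proved, stated in full; the proofs are below) =====
def Claim_equal_global_singletons : Prop := ∀ (tokenized_strings : List (List String)), Dom_global_singletons tokenized_strings → Spec_global_singletons tokenized_strings (global_singletons tokenized_strings)

-- ===== LEMMAS AND PROOFS =====

-- the per-string singleton set A computes: tokens occurring exactly once, in first-occurrence order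
def pvL (p : List String) : List String :=
  (PySem.Set.ofList p).filter (fun t => p.count t == 1)

theorem mem_pvL (p : List String) (x : String) : x ∈ pvL p ↔ p.count x = 1 := by
  simp only [pvL, List.mem_filter, PySem.Set.mem_ofList, beq_iff_eq]
  constructor
  · exact fun h => h.2
  · intro h
    exact ⟨List.count_pos_iff.mp (by omega), h⟩

theorem nodup_pvL (p : List String) : (pvL p).Nodup :=
  (PySem.Set.nodup_ofList p).filter _

theorem count_append_singleton (p : List String) (x t : String) :
    (p ++ [x]).count t = p.count t + (if t = x then 1 else 0) := by
  by_cases h : t = x <;> simp [List.count_append, h, List.count_eq_zero]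

theorem pvL_append_one (p : List String) (x : String) (h : p.count x = 1) :
    pvL (p ++ [x]) = PySem.Set.discard (pvL p) x := by
  unfold pvL PySem.Set.discard
  rw [PySem.Set.ofList_append_singleton,
    PySem.Set.add_of_mem (PySem.Set.mem_ofList p x |>.mpr (List.count_pos_iff.mp (by omega))),
    List.filter_filter]
  refine List.filter_congr ?_
  intro t _
  rw [count_append_singleton]
  by_cases ht : t = x
  · subst ht; simp [h]
  · simp [ht]

theorem pvL_append_ge2 (p : List String) (x : String) (h : 2 ≤ p.count x) :
    pvL (p ++ [x]) = pvL p := by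
  unfold pvL
  rw [PySem.Set.ofList_append_singleton,
    PySem.Set.add_of_mem (PySem.Set.mem_ofList p x |>.mpr (List.count_pos_iff.mp (by omega)))]
  refine List.filter_congr ?_
  intro t _
  rw [count_append_singleton]
  by_cases ht : t = x
  · rw [ht]
    have e1 : (p.count x + 1 == 1) = false := by simp; omega
    have e2 : (p.count x == 1) = false := by simp; omega
    simp [e1, e2]
  · simp [ht]

theorem pvL_append_zero (p : List String) (x : String) (h : p.count x = 0) :
    pvL (p ++ [x]) = pvL p ++ [x] := by
  have hx : x ∉ p := by
    intro hmem
    have := List.count_pos_iff.mpr hmem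
    omega
  unfold pvL
  rw [PySem.Set.ofList_append_singleton,
    PySem.Set.add_of_not_mem (fun hc => hx ((PySem.Set.mem_ofList p x).mp hc)),
    List.filter_append]
  congr 1
  · refine List.filter_congr ?_
    intro t hmem
    have ht : t ≠ x := fun he => hx (he ▸ (PySem.Set.mem_ofList p t).mp hmem)
    rw [count_append_singleton]
    simp [ht]
  · simp [h]

-- loop invariant for A's inner loop: first component tracks pvL, second tracks "count ≥ 2" membership
theorem innerA_inv : ∀ (xs p : List String) (lns : PySem.Set String),
    (∀ t, t ∈ lns ↔ 2 ≤ p.count t) →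
    (xs.foldl pvInnerA (pvL p, lns)).1 = pvL (p ++ xs) := by
  intro xs
  induction xs with
  | nil => intro p lns _; simp
  | cons x xs ih =>
    intro p lns hlns
    have hassoc : p ++ x :: xs = (p ++ [x]) ++ xs := by simp
    rw [List.foldl_cons, hassoc]
    by_cases h1 : p.count x = 1
    · have hstep : pvInnerA (pvL p, lns) x = (pvL (p ++ [x]), PySem.Set.add lns x) := by
        have hxm : PySem.Set.contains (pvL p) x = true :=
          (PySem.Set.contains_iff _ _).mpr ((mem_pvL p x).mpr h1)
        simp only [pvInnerA]
        rw [if_pos hxm, pvL_append_one p x h1]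
      rw [hstep]
      refine ih (p ++ [x]) _ ?_
      intro t
      rw [PySem.Set.mem_add, hlns, count_append_singleton]
      by_cases ht : t = x
      · rw [ht]; simp [h1]
      · simp [ht]
    · by_cases h2 : 2 ≤ p.count x
      · have hstep : pvInnerA (pvL p, lns) x = (pvL p, lns) := by
          have hnx : ¬ (PySem.Set.contains (pvL p) x = true) := by
            rw [PySem.Set.contains_iff, mem_pvL]; exact h1
          have hin : PySem.Set.contains lns x = true :=
            (PySem.Set.contains_iff _ _).mpr ((hlns x).mpr h2)
          simp only [pvInnerA]
          rw [if_neg hnx, if_pos hin]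
        rw [hstep, ← pvL_append_ge2 p x h2]
        refine ih (p ++ [x]) _ ?_
        intro t
        rw [hlns, count_append_singleton]
        by_cases ht : t = x
        · rw [ht, if_pos rfl]; omega
        · simp [ht]
      · have h0 : p.count x = 0 := by omega
        have hstep : pvInnerA (pvL p, lns) x = (pvL (p ++ [x]), lns) := by
          have hx : x ∉ pvL p := by rw [mem_pvL]; omega
          have hnx : ¬ (PySem.Set.contains (pvL p) x = true) := by
            rw [PySem.Set.contains_iff]; exact hx
          have hnn : ¬ (PySem.Set.contains lns x = true) := by
            rw [PySem.Set.contains_iff, hlns]; omega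
          simp only [pvInnerA]
          rw [if_neg hnx, if_neg hnn, pvL_append_zero p x h0,
            PySem.Set.add_of_not_mem hx]
        rw [hstep]
        refine ih (p ++ [x]) _ ?_
        intro t
        rw [hlns, count_append_singleton]
        by_cases ht : t = x
        · rw [ht]; simp [h0]
        · simp [ht]

theorem innerA_eq_pvL (tokens : List String) :
    (tokens.foldl pvInnerA (PySem.Set.empty, PySem.Set.empty)).1 = pvL tokens := by
  have h0 : (PySem.Set.empty : PySem.Set String) = pvL [] := by simp [pvL, PySem.Set.empty]
  have := innerA_inv tokens [] PySem.Set.empty (by intro t; simp [PySem.Set.empty])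
  simpa [h0] using this

-- A's outer loop, abstracted to the Option accumulator
def pvOptStep (acc : Option (PySem.Set String)) (tokens : List String) :
    Option (PySem.Set String) :=
  match acc with
  | none => some (pvL tokens)
  | some s => some (PySem.Set.inter s (pvL tokens))

theorem outerA_eq : ∀ (tss : List (List String)) (acc : Option (PySem.Set String)),
    (tss.foldl pvStepA (acc, PySem.Set.empty, PySem.Set.empty)).1
      = tss.foldl pvOptStep acc := by
  intro tss
  induction tss with
  | nil => intro acc; rfl
  | cons ts tss ih =>
    intro acc
    have hstep : pvStepA (acc, PySem.Set.empty, PySem.Set.empty) ts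
        = (pvOptStep acc ts, PySem.Set.empty, PySem.Set.empty) := by
      unfold pvStepA pvOptStep
      simp only [innerA_eq_pvL]
      cases acc with
      | none => simp [PySem.Set.ofList_eq_self_of_nodup _ (nodup_pvL ts)]
      | some s => rfl
    rw [List.foldl_cons, hstep, ih, List.foldl_cons]

theorem optFold_some : ∀ (rest : List (List String)) (s : PySem.Set String),
    rest.foldl pvOptStep (some s)
      = some (rest.foldl (fun s p => PySem.Set.inter s (pvL p)) s) := by
  intro rest
  induction rest with
  | nil => intro s; rfl
  | cons p rest ih => intro s; rw [List.foldl_cons, List.foldl_cons]; exact ih _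

-- intersecting with each pvL p is filtering by "count 1 in every p"
theorem interFold_eq_filter : ∀ (rest : List (List String)) (s : PySem.Set String),
    rest.foldl (fun s p => PySem.Set.inter s (pvL p)) s
      = s.filter (fun t => rest.all (fun p => p.count t == 1)) := by
  intro rest
  induction rest with
  | nil => intro s; simp
  | cons p rest ih =>
    intro s
    rw [List.foldl_cons, ih]
    have hinter : PySem.Set.inter s (pvL p)
        = s.filter (fun t => p.count t == 1) := by
      show s.filter (fun t => PySem.Set.contains (pvL p) t) = _
      refine List.filter_congr ?_
      intro t _
      by_cases hc : p.count t = 1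
      · simp [mem_pvL, hc]
      · simp [mem_pvL, hc]
    rw [hinter, List.filter_filter]
    refine List.filter_congr (fun t _ => ?_)
    by_cases hc : p.count t = 1 <;> simp [hc, Bool.and_comm]

-- A on a nonempty input, in closed form
theorem A_char (ts0 : List String) (rest : List (List String)) :
    global_singletons (ts0 :: rest)
      = some ((pvL ts0).filter (fun t => rest.all (fun p => p.count t == 1))) := by
  unfold global_singletons
  rw [outerA_eq, List.foldl_cons]
  show List.foldl pvOptStep (some (pvL ts0)) rest = _
  rw [optFold_some, interFold_eq_filter]

-- ---- B side ----

-- number of strings of tss containing t  =  count of t in the flattened per-string dedups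
theorem count_flatten_map_ofList (t : String) : ∀ (tss : List (List String)),
    ((tss.map PySem.Set.ofList).flatten).count t
      = tss.countP (fun p => decide (t ∈ p)) := by
  intro tss
  induction tss with
  | nil => rfl
  | cons p rest ih =>
    rw [List.map_cons, List.flatten_cons, List.count_append, ih, List.countP_cons]
    by_cases h : t ∈ p
    · have h1 : (PySem.Set.ofList p).count t = 1 :=
        List.count_eq_one_of_mem (PySem.Set.nodup_ofList p)
          ((PySem.Set.mem_ofList p t).mpr h)
      simp [h, Nat.add_comm]
    · have h0 : (PySem.Set.ofList p).count t = 0 := by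
        rw [List.count_eq_zero]
        exact fun hc => h ((PySem.Set.mem_ofList p t).mp hc)
      simp [h, h0]

-- dedup of a flattened list of dedups = dedup of the flattened list
theorem ofList_flatten_map_ofList : ∀ (tss : List (List String)),
    PySem.Set.ofList ((tss.map PySem.Set.ofList).flatten)
      = PySem.Set.ofList tss.flatten := by
  intro tss
  induction tss with
  | nil => rfl
  | cons p rest ih =>
    rw [List.map_cons, List.flatten_cons, List.flatten_cons,
      PySem.Set.ofList_append, PySem.Set.ofList_append,
      PySem.Set.update_eq_append_filter, PySem.Set.update_eq_append_filter,
      ih, PySem.Set.ofList_ofList]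

theorem len_le_sum (l : List Nat) (h : ∀ x ∈ l, 1 ≤ x) : l.length ≤ l.sum := by
  induction l with
  | nil => simp
  | cons a l ih =>
    have := h a (List.mem_cons_self ..)
    have := ih (fun x hx => h x (List.mem_cons_of_mem _ hx))
    simp only [List.length_cons, List.sum_cons]
    omega

theorem all_one_of_sum_eq_len (l : List Nat) (h : ∀ x ∈ l, 1 ≤ x)
    (hs : l.sum = l.length) : ∀ x ∈ l, x = 1 := by
  induction l with
  | nil => simp
  | cons a l ih =>
    have h1 := h a (List.mem_cons_self ..)
    have hlen := len_le_sum l (fun x hx => h x (List.mem_cons_of_mem _ hx))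
    simp only [List.sum_cons, List.length_cons] at hs
    intro x hx
    rcases List.mem_cons.mp hx with rfl | hx
    · omega
    · exact ih (fun y hy => h y (List.mem_cons_of_mem _ hy))
        (by omega) x hx

-- the arithmetic heart: "present in all n strings with n total occurrences"
-- ⟺ "count exactly 1 in every string", for a token of the first string
theorem key_iff (t : String) (ts0 : List String) (rest : List (List String))
    (ht0 : t ∈ ts0) :
    ((ts0 :: rest).countP (fun p => decide (t ∈ p)) = (ts0 :: rest).length
      ∧ (ts0 :: rest).flatten.count t = (ts0 :: rest).length)
    ↔ (ts0.count t = 1 ∧ ∀ p ∈ rest, p.count t = 1) := by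
  have hc0 : 1 ≤ ts0.count t := List.count_pos_iff.mpr ht0
  have hflat : (ts0 :: rest).flatten.count t
      = ts0.count t + (rest.map (List.count t)).sum := by
    rw [List.flatten_cons, List.count_append, List.count_flatten]
  constructor
  · rintro ⟨hp, hs⟩
    have hall : ∀ q ∈ ts0 :: rest, t ∈ q := fun q hq => by
      simpa using List.countP_eq_length.mp hp q hq
    have hone : ∀ c ∈ rest.map (List.count t), 1 ≤ c := by
      intro c hc
      obtain ⟨p, hpmem, rfl⟩ := List.mem_map.mp hc
      exact List.count_pos_iff.mpr (hall p (List.mem_cons_of_mem _ hpmem))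
    have hlen := len_le_sum _ hone
    rw [hflat] at hs
    simp only [List.length_cons, List.length_map] at *
    have hsum : (rest.map (List.count t)).sum = rest.length := by omega
    refine ⟨by omega, fun p hp' => ?_⟩
    exact all_one_of_sum_eq_len _ hone (by simpa using hsum) _
      (List.mem_map.mpr ⟨p, hp', rfl⟩)
  · rintro ⟨h1, hall⟩
    constructor
    · refine List.countP_eq_length.mpr fun p hp => ?_
      rcases List.mem_cons.mp hp with rfl | hp
      · simpa using ht0
      · have := hall p hp
        simp only [decide_eq_true_eq]
        exact List.count_pos_iff.mp (by omega)
    · rw [hflat, h1]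
      have : rest.map (List.count t) = rest.map (fun _ => 1) := by
        exact List.map_congr_left fun p hp => hall p hp
      rw [this]
      simp only [List.map_const', List.sum_replicate, smul_eq_mul, mul_one,
        List.length_cons]
      omega

-- B on a nonempty input, in closed form
theorem B_char (ts0 : List String) (rest : List (List String)) :
    global_singletons_alt (ts0 :: rest)
      = some ((PySem.Set.ofList (ts0 :: rest).flatten).filter
          (fun t => (((ts0 :: rest).countP (fun p => decide (t ∈ p)) : Int) == ((ts0 :: rest).length : Int))
            && (((ts0 :: rest).flatten.count t : Int) == ((ts0 :: rest).length : Int)))) := by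
  have h1 : ((ts0 :: rest).foldl
      (fun (d : PySem.Dict String Int) tokens =>
        tokens.foldl (fun d t => d.insert t (d.getD t 0 + 1)) d)
      PySem.Dict.empty) = PySem.Dict.counter (ts0 :: rest).flatten := by
    rw [← List.foldl_flatten]
    rfl
  have h2 : ((ts0 :: rest).foldl
      (fun (d : PySem.Dict String Int) tokens =>
        (PySem.Set.ofList tokens).foldl (fun d t => d.insert t (d.getD t 0 + 1)) d)
      PySem.Dict.empty) = PySem.Dict.counter ((ts0 :: rest).map PySem.Set.ofList).flatten := by
    rw [← List.foldl_map, ← List.foldl_flatten]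
    rfl
  unfold global_singletons_alt
  rw [if_neg (List.cons_ne_nil ts0 rest)]
  simp only [PySem.List.foldl_prod_mk
      (f := fun (d : PySem.Dict String Int) tokens =>
        tokens.foldl (fun d t => d.insert t (d.getD t 0 + 1)) d)
      (g := fun (d : PySem.Dict String Int) tokens =>
        (PySem.Set.ofList tokens).foldl (fun d t => d.insert t (d.getD t 0 + 1)) d),
    h1, h2, PySem.Dict.items_counter]
  rw [List.filter_map, List.map_map]
  have hmap : (Prod.fst ∘ fun k : String =>
      (k, ((((ts0 :: rest).map PySem.Set.ofList).flatten).count k : Int))) = id := rfl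
  rw [hmap, List.map_id, ofList_flatten_map_ofList]
  congr 1
  rw [PySem.Set.ofList_eq_self_of_nodup _ ((PySem.Set.nodup_ofList _).filter _)]
  refine List.filter_congr fun t _ => ?_
  simp only [Function.comp, PySem.Dict.getD_counter, count_flatten_map_ofList]

-- the two closed forms coincide
theorem main_eq (ts0 : List String) (rest : List (List String)) :
    (pvL ts0).filter (fun t => rest.all (fun p => p.count t == 1))
      = (PySem.Set.ofList (ts0 :: rest).flatten).filter
          (fun t => (((ts0 :: rest).countP (fun p => decide (t ∈ p)) : Int) == ((ts0 :: rest).length : Int))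
            && (((ts0 :: rest).flatten.count t : Int) == ((ts0 :: rest).length : Int))) := by
  rw [List.flatten_cons, PySem.Set.ofList_append, PySem.Set.update_eq_append_filter,
    List.filter_append]
  have hsecond : (((PySem.Set.ofList rest.flatten).filter
        (fun y => !(PySem.Set.contains (PySem.Set.ofList ts0) y))).filter
          (fun t => (((ts0 :: rest).countP (fun p => decide (t ∈ p)) : Int) == ((ts0 :: rest).length : Int))
            && (((ts0 ++ rest.flatten).count t : Int) == ((ts0 :: rest).length : Int)))) = [] := by
    rw [List.filter_eq_nil_iff]
    intro t htmem
    obtain ⟨_, hnot⟩ := List.mem_filter.mp htmem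
    have ht0 : t ∉ ts0 := by
      intro h
      rw [Bool.not_eq_eq_eq_not, Bool.not_true, ← Bool.not_eq_true,
        PySem.Set.contains_iff, PySem.Set.mem_ofList] at hnot
      exact hnot h
    have hcp : (ts0 :: rest).countP (fun p => decide (t ∈ p))
        = rest.countP (fun p => decide (t ∈ p)) := by
      rw [List.countP_cons]
      simp [ht0]
    have hle : rest.countP (fun p => decide (t ∈ p)) ≤ rest.length :=
      List.countP_le_length
    simp only [Bool.and_eq_true, beq_iff_eq, not_and]
    intro hpres
    exfalso
    rw [hcp] at hpres
    have : (rest.countP (fun p => decide (t ∈ p)) : Int) = rest.length + 1 := by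
      simpa [List.length_cons] using hpres
    omega
  rw [hsecond, List.append_nil]
  unfold pvL
  rw [List.filter_filter]
  refine List.filter_congr fun t htmem => ?_
  have ht0 : t ∈ ts0 := (PySem.Set.mem_ofList ts0 t).mp htmem
  have hiff := key_iff t ts0 rest ht0
  rw [List.flatten_cons] at hiff
  have hbe : ∀ (a b : Bool), (a = true ↔ b = true) → a = b := by decide
  apply hbe
  simp only [Bool.and_eq_true, beq_iff_eq, List.all_eq_true]
  constructor
  · rintro ⟨hall, h1⟩
    have := hiff.mpr ⟨h1, fun p hp' => by simpa using hall p hp'⟩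
    exact ⟨by exact_mod_cast this.1, by exact_mod_cast this.2⟩
  · rintro ⟨hp, hs⟩
    have := hiff.mp ⟨by exact_mod_cast hp, by exact_mod_cast hs⟩
    exact ⟨fun p hp' => by simpa using this.2 p hp', this.1⟩

-- ===== VERDICT (by name: the statement is the Claim_ definition above) =====
theorem global_singletons_spec : Claim_equal_global_singletons := by
  intro tss _
  unfold Spec_global_singletons
  cases tss with
  | nil => rfl
  | cons ts0 rest => rw [A_char, B_char, main_eq]
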